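-- pv_equiv track=rewrite | github.com/joybio/multiPrime2-GUI | scripts/multiPrime-core_GUI.py | current_end_list
-- ===== SOURCE A (Python) =====
-- from itertools import product
--
-- degenerate_base = {"-": ["-"], "A": ["A"], "G": ["G"], "C": ["C"], "T": ["T"], "R": ["A", "G"], "Y": ["C", "T"],
--                    "M": ["A", "C"], "K": ["G", "T"], "S": ["G", "C"], "W": ["A", "T"], "H": ["A", "T", "C"],
--                    "B": ["G", "T", "C"], "V": ["G", "A", "C"], "D": ["G", "A", "T"], "N": ["A", "T", "G", "C"]}
--
-- def degenerate_seq(primer):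
--     seq = []
--     cs = ""
--     for s in primer:
--         if s not in degenerate_base:
--             cs += s
--         else:
--             seq.append([cs + i for i in degenerate_base[s]])
--             cs = ""
--     if cs:
--         seq.append([cs])
--     return ["".join(i) for i in product(*seq)]
--
-- def current_end_list(primer, adaptor="", num=5, length=14):
--     primer_extend = adaptor + primer
--     end_seq = []
--     for i in range(num, (num + length)):
--         s = primer_extend[-i:]
--         if s:
--             end_seq.extend(degenerate_seq(s))
--     return end_seq
-- ===== SOURCE B (Python) =====
-- degenerate_base = {"-": ["-"], "A": ["A"], "G": ["G"], "C": ["C"], "T": ["T"], "R": ["A", "G"], "Y": ["C", "T"],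
--                    "M": ["A", "C"], "K": ["G", "T"], "S": ["G", "C"], "W": ["A", "T"], "H": ["A", "T", "C"],
--                    "B": ["G", "T", "C"], "V": ["G", "A", "C"], "D": ["G", "A", "T"], "N": ["A", "T", "G", "C"]}
--
-- def _expand(s):
--     # right-fold expansion: options of each char prepended to all expansions of the rest
--     res = [""]
--     for ch in reversed(s):
--         res = [o + t for o in degenerate_base.get(ch, [ch]) for t in res]
--     return res
--
-- def current_end_list(primer, adaptor="", num=5, length=14):
--     pe = adaptor + primer
--     out = []
--     prev_s = None
--     prev = []
--     for i in range(num, num + length):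
--         s = pe[-i:]
--         if not s:
--             continue
--         if prev_s is not None and s[1:] == prev_s:
--             # suffix grew by exactly one leading char: prepend its options
--             prev = [o + t for o in degenerate_base.get(s[0], [s[0]]) for t in prev]
--         elif s != prev_s:
--             prev = _expand(s)
--         prev_s = s
--         out.extend(prev)
--     return out
-- ===== Notes on version B (the rewrite author's own statement) =====
-- stated objective: faster
-- what changed: B expands each suffix with a right fold over its characters instead of A's build-groups-then-itertools.product, and reuses the previous suffix's expansion incrementally whenever the suffix grows by one leading character, so the expansion is never recomputed from scratch per length.
import Mathlib
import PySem

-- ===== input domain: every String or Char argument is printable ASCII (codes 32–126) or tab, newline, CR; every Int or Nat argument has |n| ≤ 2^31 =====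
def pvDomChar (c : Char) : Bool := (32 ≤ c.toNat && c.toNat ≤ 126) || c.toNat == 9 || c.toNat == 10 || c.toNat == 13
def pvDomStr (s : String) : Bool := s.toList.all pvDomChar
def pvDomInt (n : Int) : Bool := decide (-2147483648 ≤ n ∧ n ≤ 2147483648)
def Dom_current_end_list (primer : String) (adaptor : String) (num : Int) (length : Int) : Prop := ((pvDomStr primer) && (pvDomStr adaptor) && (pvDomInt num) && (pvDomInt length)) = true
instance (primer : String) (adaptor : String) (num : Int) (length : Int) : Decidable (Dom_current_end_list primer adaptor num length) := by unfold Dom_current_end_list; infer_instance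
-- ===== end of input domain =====

-- B replaces A's per-suffix group-then-product expansion by a right-fold expander reused
-- incrementally across suffixes (objective: faster, measured).

-- shared module constant: the degenerate_base table (values are lists of single bases)
def degLookup (c : Char) : Option (List Char) :=
  match c with
  | '-' => some ['-'] | 'A' => some ['A'] | 'G' => some ['G'] | 'C' => some ['C'] | 'T' => some ['T']
  | 'R' => some ['A','G'] | 'Y' => some ['C','T'] | 'M' => some ['A','C'] | 'K' => some ['G','T']
  | 'S' => some ['G','C'] | 'W' => some ['A','T'] | 'H' => some ['A','T','C'] | 'B' => some ['G','T','C']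
  | 'V' => some ['G','A','C'] | 'D' => some ['G','A','T'] | 'N' => some ['A','T','G','C']
  | _ => none

-- ===== PORT A =====
-- itertools.product over the list of groups (left group slowest)
def pyProduct : List (List (List Char)) → List (List (List Char))
  | [] => [[]]
  | g :: gs => g.flatMap (fun x => (pyProduct gs).map (x :: ·))

-- the for-loop of degenerate_seq: state (seq, cs)
def dsLoop : List Char → List (List (List Char)) × List Char → List (List (List Char)) × List Char
  | [], st => st
  | c :: r, (seq, cs) =>
    match degLookup c with
    | none => dsLoop r (seq, cs ++ [c])
    | some opts => dsLoop r (seq ++ [opts.map (fun o => cs ++ [o])], [])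

def degenerate_seq_core (primer : List Char) : List (List Char) :=
  let st := dsLoop primer ([], [])
  let seq := if st.2 ≠ [] then st.1 ++ [[st.2]] else st.1
  (pyProduct seq).map List.flatten

def current_end_list (primer : String) (adaptor : String) (num : Int) (length : Int) : List String :=
  ((PySem.List.pyRange num (num + length) 1).foldl
    (fun acc i =>
      let s := PySem.List.slice (adaptor.toList ++ primer.toList) (some (-i)) none
      if s ≠ [] then acc ++ degenerate_seq_core s else acc) []).map (fun l => String.ofList l)

-- ===== PORT B =====
def expandChar (c : Char) : List Char := (degLookup c).getD [c]

-- _expand: right fold, options of each char prepended to all expansions of the rest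
def expandSuffix (s : List Char) : List (List Char) :=
  s.foldr (fun ch res => (expandChar ch).flatMap (fun o => res.map (o :: ·))) [[]]

-- one iteration of B's loop: state (out, prev_s, prev)
def bStep (pe : List Char) (st : List (List Char) × Option (List Char) × List (List Char)) (i : Int) :
    List (List Char) × Option (List Char) × List (List Char) :=
  match PySem.List.slice pe (some (-i)) none with
  | [] => st
  | c :: t =>
    let prev' :=
      match st.2.1 with
      | some ps =>
        if t = ps then (expandChar c).flatMap (fun o => st.2.2.map (o :: ·))
        else if c :: t = ps then st.2.2
        else expandSuffix (c :: t)
      | none => expandSuffix (c :: t)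
    (st.1 ++ prev', some (c :: t), prev')

def current_end_list_alt (primer : String) (adaptor : String) (num : Int) (length : Int) : List String :=
  (((PySem.List.pyRange num (num + length) 1).foldl (bStep (adaptor.toList ++ primer.toList)) ([], none, [])).1).map (fun l => String.ofList l)

-- ===== PRECONDITION & SPEC =====
def Spec_current_end_list (primer : String) (adaptor : String) (num : Int) (length : Int) (out : List String) : Prop := out = current_end_list_alt primer adaptor num length
instance (primer : String) (adaptor : String) (num : Int) (length : Int) (out : List String) : Decidable (Spec_current_end_list primer adaptor num length out) := by unfold Spec_current_end_list; infer_instance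

-- ===== CLAIM (what is proved, stated in full; the proofs are below) =====
def Claim_equal_current_end_list : Prop := ∀ (primer : String) (adaptor : String) (num : Int) (length : Int), Dom_current_end_list primer adaptor num length → Spec_current_end_list primer adaptor num length (current_end_list primer adaptor num length)

-- ===== LEMMAS AND PROOFS =====

theorem expandSuffix_cons (c : Char) (r : List Char) :
    expandSuffix (c :: r) = (expandChar c).flatMap (fun o => (expandSuffix r).map (o :: ·)) := rfl

-- A's loop started from an arbitrary group list just appends to that list
theorem dsLoop_append (s : List Char) (seq : List (List (List Char))) (cs : List Char) :
    dsLoop s (seq, cs) = (seq ++ (dsLoop s ([], cs)).1, (dsLoop s ([], cs)).2) := by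
  induction s generalizing seq cs with
  | nil => simp [dsLoop]
  | cons c r ih =>
    cases h : degLookup c with
    | none =>
      simp only [dsLoop, h]
      exact ih seq (cs ++ [c])
    | some opts =>
      simp only [dsLoop, h, List.nil_append]
      rw [ih (seq ++ [opts.map (fun o => cs ++ [o])]) [], ih [opts.map (fun o => cs ++ [o])] []]
      simp

-- main lemma: A's group-then-product expansion equals B's right-fold expander,
-- with the pending non-degenerate prefix cs prepended to every result
theorem dsCore_eq (s : List Char) (cs : List Char) :
    (pyProduct (if (dsLoop s ([], cs)).2 ≠ [] then (dsLoop s ([], cs)).1 ++ [[(dsLoop s ([], cs)).2]] else (dsLoop s ([], cs)).1)).map List.flatten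
      = (expandSuffix s).map (cs ++ ·) := by
  induction s generalizing cs with
  | nil =>
    by_cases h : cs = []
    · subst h; simp [dsLoop, pyProduct, expandSuffix]
    · simp [dsLoop, h, pyProduct, expandSuffix]
  | cons c r ih =>
    cases h : degLookup c with
    | none =>
      simp only [dsLoop, h]
      rw [ih (cs ++ [c]), expandSuffix_cons]
      simp [expandChar, h, List.map_map, Function.comp_def, List.append_assoc]
    | some opts =>
      simp only [dsLoop, h, List.nil_append]
      rw [dsLoop_append r [opts.map (fun o => cs ++ [o])] []]
      have key := ih ([] : List Char)
      simp only [List.nil_append, List.singleton_append] at key ⊢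
      generalize hA : dsLoop r ([], ([] : List Char)) = A at key ⊢
      have hsplit : (if A.2 ≠ [] then (opts.map (fun o => cs ++ [o]) :: A.1) ++ [[A.2]]
          else opts.map (fun o => cs ++ [o]) :: A.1)
          = opts.map (fun o => cs ++ [o]) :: (if A.2 ≠ [] then A.1 ++ [[A.2]] else A.1) := by
        split_ifs <;> simp
      rw [hsplit, expandSuffix_cons]
      simp only [pyProduct, List.map_flatMap, List.map_map]
      simp only [expandChar, h, Option.getD_some, List.flatMap_def, List.map_map, Function.comp_def,
        List.flatten_cons, List.append_assoc, List.singleton_append]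
      have key' : List.map List.flatten (pyProduct (if A.2 ≠ [] then A.1 ++ [[A.2]] else A.1)) = expandSuffix r := by
        simpa using key
      have key2 : ∀ o : Char, List.map (fun t => cs ++ o :: List.flatten t)
            (pyProduct (if A.2 ≠ [] then A.1 ++ [[A.2]] else A.1))
          = List.map (fun t => cs ++ o :: t) (expandSuffix r) := by
        intro o
        rw [← key', List.map_map]
        symm
        apply List.map_congr_left
        intro t _
        rfl
      exact congrArg List.flatten (List.map_congr_left (fun o _ => key2 o))

theorem degenerate_seq_eq (s : List Char) : degenerate_seq_core s = expandSuffix s := by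
  have := dsCore_eq s []
  simpa [degenerate_seq_core] using this

-- the contribution of index i in either loop
def perIdx (pe : List Char) (i : Int) : List (List Char) :=
  match PySem.List.slice pe (some (-i)) none with
  | [] => []
  | c :: t => expandSuffix (c :: t)

theorem aLoop_eq_flatMap (pe : List Char) (l : List Int) (acc : List (List Char)) :
    l.foldl (fun acc i =>
      let s := PySem.List.slice pe (some (-i)) none
      if s ≠ [] then acc ++ degenerate_seq_core s else acc) acc
    = acc ++ l.flatMap (perIdx pe) := by
  induction l generalizing acc with
  | nil => simp
  | cons i l ih =>
    simp only [List.foldl_cons, List.flatMap_cons]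
    rw [ih]
    cases h : PySem.List.slice pe (some (-i)) none with
    | nil => simp [perIdx, h]
    | cons c t => simp [perIdx, h, degenerate_seq_eq]

-- invariant of B's loop state: prev is the expansion of prev_s
def BInv (st : List (List Char) × Option (List Char) × List (List Char)) : Prop :=
  ∀ ps, st.2.1 = some ps → st.2.2 = expandSuffix ps

theorem bLoop_eq_flatMap (pe : List Char) (l : List Int)
    (st : List (List Char) × Option (List Char) × List (List Char)) (hinv : BInv st) :
    (l.foldl (bStep pe) st).1 = st.1 ++ l.flatMap (perIdx pe) := by
  induction l generalizing st with
  | nil => simp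
  | cons i l ih =>
    simp only [List.foldl_cons, List.flatMap_cons]
    cases h : PySem.List.slice pe (some (-i)) none with
    | nil =>
      have hstep : bStep pe st i = st := by simp [bStep, h]
      rw [hstep, ih st hinv]; simp [perIdx, h]
    | cons c t =>
      have hprev : (bStep pe st i).2.2 = expandSuffix (c :: t) := by
        simp only [bStep, h]
        cases hps : st.2.1 with
        | none => simp
        | some ps =>
          simp only
          by_cases h1 : t = ps
          · subst h1
            rw [hinv t hps]
            simp [expandSuffix_cons]
          · by_cases h2 : c :: t = ps
            · simp only [if_neg h1, if_pos h2]
              rw [h2]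
              exact hinv ps (by rw [hps])
            · simp [h1, h2]
      have hstep : bStep pe st i = (st.1 ++ expandSuffix (c :: t), some (c :: t), expandSuffix (c :: t)) := by
        have : bStep pe st i = (st.1 ++ (bStep pe st i).2.2, some (c :: t), (bStep pe st i).2.2) := by
          simp only [bStep, h]
        rw [this, hprev]
      rw [hstep, ih _ (by intro ps hps; cases hps; rfl)]
      simp [perIdx, h]

-- ===== VERDICT (by name: the statement is the Claim_ definition above) =====
theorem current_end_list_spec : Claim_equal_current_end_list := by
  intro primer adaptor num length _
  unfold Spec_current_end_list current_end_list current_end_list_alt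
  rw [aLoop_eq_flatMap, bLoop_eq_flatMap _ _ _ (by intro ps hps; cases hps)]
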